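-- pv_equiv track=rewrite | github.com/nickderobertis/py-file-conf | dero/manager/imports/logic/parse/clean.py | _clean_import_statement
-- ===== SOURCE A (Python) =====
-- def _clean_import_statement(import_str: str) -> str:
--     remove_chars = [
--         '(',
--         ')',
--         '\\',
--     ]
--     for char in remove_chars:
--         import_str = import_str.replace(char, '')
--
--     return import_str
-- ===== SOURCE B (Python) =====
-- def _clean_import_statement(import_str: str) -> str:
--     return ''.join(c for c in import_str if c not in '()\\')
-- ===== Notes on version B (the rewrite author's own statement) =====
-- stated objective: simpler
-- what changed: A runs three sequential full-string replace passes (a loop over the removal-character list); B makes one filtering pass over the characters of the string, joining those not in '()\'.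
import Mathlib
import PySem

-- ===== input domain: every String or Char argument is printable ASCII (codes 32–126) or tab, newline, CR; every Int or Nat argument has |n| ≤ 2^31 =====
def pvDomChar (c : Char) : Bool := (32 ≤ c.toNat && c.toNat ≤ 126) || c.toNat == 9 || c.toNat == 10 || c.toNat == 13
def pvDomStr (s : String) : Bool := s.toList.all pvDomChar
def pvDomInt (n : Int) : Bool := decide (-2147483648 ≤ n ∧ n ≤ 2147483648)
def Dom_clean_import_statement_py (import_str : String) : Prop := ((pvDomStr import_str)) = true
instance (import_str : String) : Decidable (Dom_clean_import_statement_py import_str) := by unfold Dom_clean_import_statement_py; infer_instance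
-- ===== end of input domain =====

-- B changes the traversal shape: A loops over the removal list doing one replace pass per
-- character; B makes a single filtering pass over the string (objective: simpler).

-- ===== PORT A =====
-- A: for char in ['(', ')', '\\']: import_str = import_str.replace(char, '')
def clean_import_statement_py (import_str : String) : String :=
  ['(', ')', '\\'].foldl (fun s ch => PySem.Str.replace s (String.ofList [ch]) "") import_str

-- ===== PORT B =====
-- B: ''.join(c for c in import_str if c not in '()\\')
def clean_import_statement_py_alt (import_str : String) : String :=
  String.ofList (import_str.toList.filter (fun c => !(['(', ')', '\\'].contains c)))

-- ===== PRECONDITION & SPEC =====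
def Spec_clean_import_statement_py (import_str : String) (out : String) : Prop := out = clean_import_statement_py_alt import_str
instance (import_str : String) (out : String) : Decidable (Spec_clean_import_statement_py import_str out) := by unfold Spec_clean_import_statement_py; infer_instance

-- ===== CLAIM (what is proved, stated in full; the proofs are below) =====
def Claim_equal_clean_import_statement_py : Prop := ∀ (import_str : String), Dom_clean_import_statement_py import_str → Spec_clean_import_statement_py import_str (clean_import_statement_py import_str)

-- ===== LEMMAS AND PROOFS =====

-- replace.go for pattern [c], replacement [], is filtering out c
theorem replace_go_filter (c : Char) (fuel : Nat) (l acc : List Char)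
    (h : l.length ≤ fuel) :
    PySem.Chars.replace.go [c] [] fuel l acc = acc.reverse ++ l.filter (· ≠ c) := by
  induction fuel generalizing l acc with
  | zero =>
    have : l = [] := List.length_eq_zero_iff.mp (Nat.le_zero.mp h)
    subst this
    simp [PySem.Chars.replace.go]
  | succ n ih =>
    cases l with
    | nil => simp [PySem.Chars.replace.go]
    | cons x t =>
      simp only [PySem.Chars.replace.go]
      by_cases hx : x = c
      · subst hx
        simp only [List.isPrefixOf, BEq.rfl, Bool.and_true, if_true, List.length_cons,
          List.length_nil, Nat.zero_add, List.drop_succ_cons, List.drop_zero, List.reverse_nil,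
          List.nil_append]
        rw [ih t acc (by simpa using Nat.le_of_succ_le_succ h)]
        simp
      · have : List.isPrefixOf [c] (x :: t) = false := by
          simp [List.isPrefixOf]
          exact fun hcx => absurd hcx.symm hx
        rw [this]
        simp only [Bool.false_eq_true, if_false]
        rw [ih t (x :: acc) (by simpa using Nat.le_of_succ_le_succ h)]
        simp [hx]

theorem replace_single_empty (s : List Char) (c : Char) :
    PySem.Chars.replace s [c] [] = s.filter (· ≠ c) := by
  rw [PySem.Chars.replace]
  simp only [List.isEmpty_cons, Bool.false_eq_true, if_false]
  simpa using replace_go_filter c s.length s []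

-- ===== VERDICT (by name: the statement is the Claim_ definition above) =====
theorem clean_import_statement_py_spec : Claim_equal_clean_import_statement_py := by
  intro s _
  show clean_import_statement_py s = clean_import_statement_py_alt s
  simp only [clean_import_statement_py, clean_import_statement_py_alt, List.foldl,
    PySem.Str.replace]
  simp only [String.toList_ofList, String.toList_empty, replace_single_empty]
  rw [List.filter_filter, List.filter_filter]
  congr 1
  refine List.filter_congr (fun x _ => ?_)
  simp only [List.contains_cons, List.contains_nil, Bool.or_false]
  by_cases h1 : x = '(' <;> by_cases h2 : x = ')' <;> by_cases h3 : x = '\\' <;>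
    simp [h1, h2, h3]
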